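-- pv_equiv track=rewrite | github.com/FumiHubCNS/samidare-python-analysis | src/samidare_lib/decoder/binary_dumper_version2.py | format_2byte_groups_from_pairs
-- ===== SOURCE A (Python) =====
-- def format_2byte_groups_from_pairs(pairs):
--     """
--     pairs: [(pos:int, byte:int), ...]
--     を2バイトずつの"aaaa bbbb ... ee"形式のhex文字列にする。
--     """
--     bs = bytes(b for _, b in pairs)
--     out = []
--     i = 0
--     n = len(bs)
--     while i + 1 < n:
--         out.append(f"{bs[i]:02x}{bs[i+1]:02x}")
--         i += 2
--     if i < n:
--         out.append(f"{bs[i]:02x}")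
--     return " ".join(out)
-- ===== SOURCE B (Python) =====
-- def format_2byte_groups_from_pairs(pairs):
--     h = bytes(b for _, b in pairs).hex()
--     return " ".join(h[i:i + 4] for i in range(0, len(h), 4))
-- ===== Notes on version B (the rewrite author's own statement) =====
-- stated objective: idiomatic
-- what changed: B produces the whole hex string at once with bytes.hex() and then groups it by slicing fixed 4-character windows, instead of A's index loop over byte pairs with per-byte f-string formatting.
import Mathlib
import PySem

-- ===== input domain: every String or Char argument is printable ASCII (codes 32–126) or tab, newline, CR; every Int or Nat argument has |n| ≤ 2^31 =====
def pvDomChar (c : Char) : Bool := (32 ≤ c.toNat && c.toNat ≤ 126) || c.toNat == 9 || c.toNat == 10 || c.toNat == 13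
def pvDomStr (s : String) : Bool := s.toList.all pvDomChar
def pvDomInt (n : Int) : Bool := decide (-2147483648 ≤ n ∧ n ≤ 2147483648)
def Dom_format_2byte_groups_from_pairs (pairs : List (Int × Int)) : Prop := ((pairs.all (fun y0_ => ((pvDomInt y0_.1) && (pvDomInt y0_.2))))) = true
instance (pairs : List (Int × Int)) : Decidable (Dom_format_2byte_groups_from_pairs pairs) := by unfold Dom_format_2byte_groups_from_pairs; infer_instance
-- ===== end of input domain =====

-- B builds the whole hex string at once and regroups it by 4-character windows,
-- instead of A's two-at-a-time index loop with per-byte formatting (idiomatic rewrite).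


-- ===== PORT A =====
-- hex digit table; exact for 0 ≤ n < 16 (the only values reached under Pre_)
def pvHexDig (n : Int) : Char :=
  (['0','1','2','3','4','5','6','7','8','9','a','b','c','d','e','f']).getD n.toNat '0'

-- f"{b:02x}" for 0 ≤ b < 256: exactly two lowercase hex digits (ported by hand; exact on Pre_)
def pvA_hex2 (b : Int) : String :=
  String.ofList [pvHexDig (PySem.Int.floordiv b 16), pvHexDig (PySem.Int.mod b 16)]

-- the while-loop: i advances by 2; ported as consuming the byte list two at a time
def pvA_loop : List Int → List String
  | a :: b :: rest => (pvA_hex2 a ++ pvA_hex2 b) :: pvA_loop rest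
  | [a] => [pvA_hex2 a]
  | [] => []

def format_2byte_groups_from_pairs (pairs : List (Int × Int)) : String :=
  String.intercalate " " (pvA_loop (pairs.map Prod.snd))

-- ===== PORT B =====
-- bytes(...).hex(): two lowercase hex digits per byte, concatenated (ported by hand; exact on Pre_)
def pvB_hexChars (b : Int) : List Char :=
  [pvHexDig (PySem.Int.floordiv b 16), pvHexDig (PySem.Int.mod b 16)]

-- h[i:i+4] for i in range(0, len(h), 4): fixed 4-character windows of the hex string
def pvB_chunk4 : List Char → List String
  | c1 :: c2 :: c3 :: c4 :: rest => String.ofList [c1, c2, c3, c4] :: pvB_chunk4 rest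
  | [] => []
  | rest => [String.ofList rest]

def format_2byte_groups_from_pairs_alt (pairs : List (Int × Int)) : String :=
  String.intercalate " " (pvB_chunk4 ((pairs.map Prod.snd).flatMap pvB_hexChars))

-- ===== PRECONDITION & SPEC =====
-- bytes() raises ValueError unless every byte value is in 0..255 (both A and B raise there)
def Pre_format_2byte_groups_from_pairs (pairs : List (Int × Int)) : Prop :=
  (pairs.all (fun p => decide (0 ≤ p.2 ∧ p.2 < 256))) = true
instance (pairs : List (Int × Int)) : Decidable (Pre_format_2byte_groups_from_pairs pairs) := by
  unfold Pre_format_2byte_groups_from_pairs; infer_instance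

def pvWitness_format_2byte_groups_from_pairs : (List (Int × Int)) := [(0, 1), (1, 255), (2, 16)]

def Spec_format_2byte_groups_from_pairs (pairs : List (Int × Int)) (out : String) : Prop := out = format_2byte_groups_from_pairs_alt pairs
instance (pairs : List (Int × Int)) (out : String) : Decidable (Spec_format_2byte_groups_from_pairs pairs out) := by unfold Spec_format_2byte_groups_from_pairs; infer_instance

-- ===== CLAIM (what is proved, stated in full; the proofs are below) =====
def Claim_equal_format_2byte_groups_from_pairs : Prop := ∀ (pairs : List (Int × Int)), Dom_format_2byte_groups_from_pairs pairs → Pre_format_2byte_groups_from_pairs pairs → Spec_format_2byte_groups_from_pairs pairs (format_2byte_groups_from_pairs pairs)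

-- ===== LEMMAS AND PROOFS =====
lemma chunk4_flatMap (bs : List Int) :
    pvB_chunk4 (bs.flatMap pvB_hexChars) = pvA_loop bs := by
  induction bs using pvA_loop.induct with
  | case1 a b rest ih =>
      simp only [List.flatMap_cons, pvB_hexChars, pvA_loop, pvA_hex2,
        List.cons_append, List.nil_append, pvB_chunk4, ih, ← String.ofList_append]
  | case2 a =>
      simp [pvA_loop, pvB_hexChars, pvB_chunk4, pvA_hex2, List.flatMap_cons]
  | case3 =>
      simp [pvA_loop, pvB_chunk4]

-- ===== VERDICT (by name: the statement is the Claim_ definition above) =====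
theorem format_2byte_groups_from_pairs_spec : Claim_equal_format_2byte_groups_from_pairs := by
  intro pairs _ _
  unfold Spec_format_2byte_groups_from_pairs format_2byte_groups_from_pairs
    format_2byte_groups_from_pairs_alt
  rw [chunk4_flatMap]
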